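-- pv_equiv track=rewrite | github.com/qeedquan/challenges | codewars/decimal-to-factorial-and-back.py | dec2fac
-- ===== SOURCE A (Python) =====
-- def dec2fac(n):
--     s = ""
--     m = 1
--     while n > 0:
--         c = n % m
--         if c > 9:
--             c = c + ord('A') - 10
--             s = "%c%s" % (c, s)
--         else:
--             s = "%d%s" % (c, s)
--         n //= m
--         m += 1
--     return s
-- ===== SOURCE B (Python) =====
-- def dec2fac(n):
--     if n <= 0:
--         return ""
--     # find the top place: smallest f = (m-1)! with f > n
--     f, m = 1, 1
--     while f <= n:
--         f *= m
--         m += 1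
--     # emit digits most-significant first, places m-1 down to 1
--     out = ""
--     while m > 1:
--         m -= 1
--         f //= m          # f = (m-1)!
--         d, n = divmod(n, f)
--         out += chr(d + 48) if d <= 9 else chr(d + 55)
--     return out
-- ===== Notes on version B (the rewrite author's own statement) =====
-- stated objective: alternative
-- what changed: B emits the factorial-base digits most-significant-first by first growing factorials to find the top place and then dividing by descending factorials, instead of A's least-significant-first remainder loop with string prepending.
import Mathlib
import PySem

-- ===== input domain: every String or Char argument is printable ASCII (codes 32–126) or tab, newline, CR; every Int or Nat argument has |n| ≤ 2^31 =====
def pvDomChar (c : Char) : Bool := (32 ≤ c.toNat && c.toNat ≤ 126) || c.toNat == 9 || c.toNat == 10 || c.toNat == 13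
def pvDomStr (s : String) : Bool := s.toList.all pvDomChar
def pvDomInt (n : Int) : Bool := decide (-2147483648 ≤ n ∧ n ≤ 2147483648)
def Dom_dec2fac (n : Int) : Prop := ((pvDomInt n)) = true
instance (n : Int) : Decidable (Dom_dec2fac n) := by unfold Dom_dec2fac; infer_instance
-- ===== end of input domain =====

-- B converts to factorial base most-significant-digit first (grow factorials to find the top place,
-- then divide by descending factorials) instead of A's least-significant-first remainder loop.

-- ===== PORT A =====
-- A's digit rendering: "%c" of c+ord('A')-10 when c > 9, else "%d" of c
def dec2facDig (c : Int) : String :=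
  if 9 < c then String.mk [Char.ofNat (c + 55).toNat] else PySem.Int.toStr c

-- A's while loop; the Python counter m only takes the values 1,2,3,…, represented as Nat
def dec2facGo (n : Int) (m : Nat) (s : String) : String :=
  if 0 < n then
    dec2facGo (PySem.Int.floordiv n m) (m + 1) (dec2facDig (PySem.Int.mod n m) ++ s)
  else s
termination_by n.toNat * 2 + (if m ≤ 1 then 1 else 0)
decreasing_by
  rename_i h
  match m with
  | 0 =>
      have h0 : PySem.Int.floordiv n 0 = 0 := by simp [PySem.Int.floordiv]
      simp [h0]
      omega
  | 1 =>
      simp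
  | (k+2) =>
      have h2 : (0:Int) < ((k+2 : Nat) : Int) := by positivity
      rw [PySem.Int.floordiv_eq_ediv_of_pos h2]
      have hlt : n / ((k+2 : Nat) : Int) < n := by
        apply Int.ediv_lt_of_lt_mul h2
        have : (2:Int) ≤ ((k+2:Nat):Int) := by push_cast; omega
        nlinarith
      have e1 : ¬ (k+2 ≤ 1) := by omega
      have e2 : ¬ (k+2+1 ≤ 1) := by omega
      simp only [e1, e2, if_false]
      omega

def dec2fac (n : Int) : String := dec2facGo n 1 ""

-- ===== PORT B =====
-- helper for the termination proof argument of dec2facFind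
theorem pvOneLeMulNat (f : Int) (m : Nat) (hf : 1 ≤ f) (hm : 1 ≤ m) : 1 ≤ f * (m : Int) := by
  have hm' : (1:Int) ≤ (m:Int) := by exact_mod_cast hm
  nlinarith

-- B's digit rendering: chr(d+48) if d <= 9 else chr(d+55)
def dec2facDigB (d : Int) : String :=
  if d ≤ 9 then String.mk [Char.ofNat (d + 48).toNat] else String.mk [Char.ofNat (d + 55).toNat]

-- B's first loop: f *= m; m += 1 while f <= n (f stays ≥ 1, m ≥ 1: carried as proof arguments)
def dec2facFind (n f : Int) (m : Nat) (hf : 1 ≤ f) (hm : 1 ≤ m) : Int × Nat :=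
  if f ≤ n then
    dec2facFind n (f * (m : Int)) (m + 1) (pvOneLeMulNat f m hf hm) (by omega)
  else (f, m)
termination_by (n + 1 - f).toNat * 2 + (if m ≤ 1 then 1 else 0)
decreasing_by
  rename_i h
  match m, hm with
  | 1, _ =>
      simp
  | (k+2), _ =>
      have hm' : (2:Int) ≤ ((k+2 : Nat) : Int) := by push_cast; omega
      have hstep : f + 1 ≤ f * ((k+2 : Nat) : Int) := by nlinarith
      have e1 : ¬ (k+2 ≤ 1) := by omega
      have e2 : ¬ (k+2+1 ≤ 1) := by omega
      simp only [e1, e2, if_false]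
      omega

-- B's second loop: m -= 1; f //= m; d, n = divmod(n, f); append digit of d
def dec2facEmit (n f : Int) (m : Nat) (out : String) : String :=
  if 1 < m then
    let m' := m - 1
    let f' := PySem.Int.floordiv f (m' : Int)
    let d := PySem.Int.floordiv n f'
    dec2facEmit (PySem.Int.mod n f') f' m' (out ++ dec2facDigB d)
  else out
termination_by m
decreasing_by omega

def dec2fac_alt (n : Int) : String :=
  if n ≤ 0 then ""
  else
    let fm := dec2facFind n 1 1 (le_refl 1) (le_refl 1)
    dec2facEmit n fm.1 fm.2 ""

-- ===== PRECONDITION & SPEC =====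
def Spec_dec2fac (n : Int) (out : String) : Prop := out = dec2fac_alt n
instance (n : Int) (out : String) : Decidable (Spec_dec2fac n out) := by unfold Spec_dec2fac; infer_instance

-- ===== CLAIM (what is proved, stated in full; the proofs are below) =====
def Claim_equal_dec2fac : Prop := ∀ (n : Int), Dom_dec2fac n → Spec_dec2fac n (dec2fac n)

-- ===== LEMMAS AND PROOFS =====

-- rising product m·(m+1)·…·(m+k-1), so pvRise 1 k = k!
def pvRise (m k : Nat) : Int :=
  match k with
  | 0 => 1
  | k+1 => (m : Int) * pvRise (m+1) k

-- MSB-first digit string of n for the k moduli m, m+1, …, m+k-1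
def pvU (m k : Nat) (n : Int) : String :=
  match k with
  | 0 => ""
  | k+1 => dec2facDigB (PySem.Int.floordiv n (pvRise m k)) ++ pvU m k (PySem.Int.mod n (pvRise m k))

theorem pvRise_pos (k : Nat) : ∀ m : Nat, 1 ≤ m → 0 < pvRise m k := by
  induction k with
  | zero => intro m _; simp [pvRise]
  | succ k ih =>
      intro m hm
      have h1 : (0:Int) < (m:Int) := by exact_mod_cast hm
      have h2 := ih (m+1) (by omega)
      simp only [pvRise]
      positivity

theorem pvRise_succ_right (k : Nat) :
    ∀ m : Nat, pvRise m (k+1) = pvRise m k * ((m + k : Nat) : Int) := by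
  induction k with
  | zero => intro m; simp [pvRise]
  | succ k ih =>
      intro m
      show (m : Int) * pvRise (m+1) (k+1) = (m : Int) * pvRise (m+1) k * ((m + (k+1) : Nat) : Int)
      rw [ih (m+1)]
      push_cast
      ring

theorem dig_eq_digB (c : Int) (hc : 0 ≤ c) : dec2facDig c = dec2facDigB c := by
  by_cases h : 9 < c
  · have h' : ¬ c ≤ 9 := by omega
    simp [dec2facDig, dec2facDigB, h, h']
  · have h9 : c ≤ 9 := by omega
    interval_cases c <;> decide

-- peel the LAST digit (modulus m) off an MSB-first digit string
theorem pvU_snoc (k : Nat) : ∀ (m : Nat) (n : Int), 1 ≤ m → 0 ≤ n → n < pvRise m (k+1) →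
    pvU m (k+1) n = pvU (m+1) k (PySem.Int.floordiv n (m : Int)) ++
      dec2facDigB (PySem.Int.mod n (m : Int)) := by
  induction k with
  | zero =>
      intro m n hm hn hlt
      have hmpos : (0:Int) < (m:Int) := by exact_mod_cast hm
      have hm1 : n < (m:Int) := by simpa [pvRise] using hlt
      rw [PySem.Int.mod_eq_emod_of_pos hmpos, Int.emod_eq_of_lt hn hm1]
      show dec2facDigB (PySem.Int.floordiv n (pvRise m 0)) ++ "" = "" ++ dec2facDigB n
      have hf1 : PySem.Int.floordiv n (pvRise m 0) = n := by simp [pvRise, PySem.Int.floordiv]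
      rw [hf1, String.append_empty, String.empty_append]
  | succ k ih =>
      intro m n hm hn hlt
      have hmpos : (0:Int) < (m:Int) := by exact_mod_cast hm
      have hRpos : (0:Int) < pvRise (m+1) k := pvRise_pos k (m+1) (by omega)
      have hR1pos : (0:Int) < pvRise (m+1) (k+1) := pvRise_pos (k+1) (m+1) (by omega)
      have hRmid : (0:Int) < pvRise m (k+1) := pvRise_pos (k+1) m hm
      -- unfold both sides (pvU at level k+2 on the left, at level (m+1), k+1 on the right)
      show dec2facDigB (PySem.Int.floordiv n (pvRise m (k+1))) ++
          pvU m (k+1) (PySem.Int.mod n (pvRise m (k+1))) =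
        dec2facDigB (PySem.Int.floordiv (PySem.Int.floordiv n (m:Int)) (pvRise (m+1) k)) ++
          pvU (m+1) k (PySem.Int.mod (PySem.Int.floordiv n (m:Int)) (pvRise (m+1) k)) ++
          dec2facDigB (PySem.Int.mod n (m:Int))
      simp only [PySem.Int.floordiv_eq_ediv_of_pos hRmid, PySem.Int.floordiv_eq_ediv_of_pos hmpos,
        PySem.Int.floordiv_eq_ediv_of_pos hRpos, PySem.Int.mod_eq_emod_of_pos hRmid,
        PySem.Int.mod_eq_emod_of_pos hmpos, PySem.Int.mod_eq_emod_of_pos hRpos]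
      have hmodnn' : 0 ≤ n % pvRise m (k+1) := Int.emod_nonneg n (by omega)
      have hmodlt' : n % pvRise m (k+1) < pvRise m (k+1) := Int.emod_lt_of_pos n hRmid
      rw [ih m (n % pvRise m (k+1)) hm hmodnn' hmodlt']
      simp only [PySem.Int.floordiv_eq_ediv_of_pos hmpos, PySem.Int.mod_eq_emod_of_pos hmpos]
      -- the (m,k+1)-level quantities in terms of the (m+1,k)-level ones
      have hdd : pvRise m (k+1) = (m:Int) * pvRise (m+1) k := rfl
      have ha' : (n % pvRise m (k+1)) / (m:Int) = (n / (m:Int)) % pvRise (m+1) k := by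
        -- same computation one level down: instantiate the generic identities
        have hPpos' : (0:Int) < pvRise m (k+1) := hRmid
        have hq' : pvRise m (k+1) * (n / pvRise m (k+1)) + n % pvRise m (k+1) = n := by
          have := Int.emod_add_ediv n (pvRise m (k+1))
          omega
        have hsub' : n % pvRise m (k+1) = n + (-(pvRise (m+1) k * (n / pvRise m (k+1)))) * (m:Int) := by
          rw [hdd] at hq' ⊢
          ring_nf
          ring_nf at hq'
          omega
        rw [hsub', Int.add_mul_ediv_right _ _ (by omega : (m:Int) ≠ 0)]
        have haa : n / (m:Int) / pvRise (m+1) k = n / pvRise m (k+1) := by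
          rw [hdd]
          exact Int.ediv_ediv_of_nonneg (by omega)
        have hmodR' : (n / (m:Int)) % pvRise (m+1) k =
            n / (m:Int) - pvRise (m+1) k * (n / (m:Int) / pvRise (m+1) k) := by
          have := Int.emod_add_ediv (n / (m:Int)) (pvRise (m+1) k)
          omega
        rw [hmodR', haa]
        ring
      have hc' : (n % pvRise m (k+1)) % (m:Int) = n % (m:Int) := by
        have hdvd : (m:Int) ∣ pvRise m (k+1) := by
          rw [hdd]; exact Dvd.intro _ rfl
        exact Int.emod_emod_of_dvd n hdvd
      have haTop : n / pvRise m (k+1) = n / (m:Int) / pvRise (m+1) k := by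
        rw [hdd]; exact (Int.ediv_ediv_of_nonneg (by omega)).symm
      rw [haTop, ha', hc']
      rw [← String.append_assoc]
  -- end pvU_snoc

-- A's loop computes the MSB-first digit string when (number of digits) = j+1
theorem goA_eq (j : Nat) : ∀ (m : Nat) (n : Int) (s : String), 1 ≤ m →
    pvRise m j ≤ n → n < pvRise m (j+1) →
    dec2facGo n m s = pvU m (j+1) n ++ s := by
  induction j with
  | zero =>
      intro m n s hm hlo hhi
      have hmpos : (0:Int) < (m:Int) := by exact_mod_cast hm
      have hn1 : (1:Int) ≤ n := by simpa [pvRise] using hlo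
      have hnm : n < (m:Int) := by simpa [pvRise] using hhi
      rw [dec2facGo.eq_def]
      simp only [if_pos (by omega : (0:Int) < n)]
      rw [PySem.Int.floordiv_eq_ediv_of_pos hmpos, PySem.Int.mod_eq_emod_of_pos hmpos]
      rw [Int.ediv_eq_zero_of_lt (by omega) hnm, Int.emod_eq_of_lt (by omega) hnm]
      rw [dec2facGo.eq_def]
      simp only [if_neg (by omega : ¬ (0:Int) < 0)]
      show dec2facDig n ++ s = pvU m 1 n ++ s
      have : pvU m 1 n = dec2facDigB (PySem.Int.floordiv n (pvRise m 0)) ++ "" := rfl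
      rw [this, String.append_empty]
      have hf1 : PySem.Int.floordiv n (pvRise m 0) = n := by simp [pvRise, PySem.Int.floordiv]
      rw [hf1, dig_eq_digB n (by omega)]
  | succ j ih =>
      intro m n s hm hlo hhi
      have hmpos : (0:Int) < (m:Int) := by exact_mod_cast hm
      have hRj : (0:Int) < pvRise (m+1) j := pvRise_pos j (m+1) (by omega)
      have hlo' : pvRise m (j+1) = (m:Int) * pvRise (m+1) j := rfl
      have hhi' : pvRise m (j+2) = (m:Int) * pvRise (m+1) (j+1) := rfl
      have hnpos : (0:Int) < n := by nlinarith [hlo, hlo', hmpos, hRj]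
      rw [dec2facGo.eq_def]
      simp only [if_pos hnpos]
      rw [PySem.Int.floordiv_eq_ediv_of_pos hmpos, PySem.Int.mod_eq_emod_of_pos hmpos]
      have hdiv_lo : pvRise (m+1) j ≤ n / (m:Int) := by
        rw [Int.le_ediv_iff_mul_le hmpos]
        calc pvRise (m+1) j * (m:Int) = (m:Int) * pvRise (m+1) j := by ring
        _ ≤ n := by rw [← hlo']; exact hlo
      have hdiv_hi : n / (m:Int) < pvRise (m+1) (j+1) := by
        rw [Int.ediv_lt_iff_lt_mul hmpos]
        calc n < pvRise m (j+2) := hhi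
        _ = pvRise (m+1) (j+1) * (m:Int) := by rw [hhi']; ring
      rw [ih (m+1) (n / (m:Int)) (dec2facDig (n % (m:Int)) ++ s) (by omega) hdiv_lo hdiv_hi]
      have hmodnn : 0 ≤ n % (m:Int) := Int.emod_nonneg n (by omega)
      rw [dig_eq_digB _ hmodnn]
      have hsnoc := pvU_snoc (j+1) m n hm (by omega) hhi
      rw [PySem.Int.floordiv_eq_ediv_of_pos hmpos, PySem.Int.mod_eq_emod_of_pos hmpos] at hsnoc
      rw [← String.append_assoc, ← hsnoc]

-- B's second loop, started at f = k!, m = k+1, emits exactly the MSB-first digit string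
theorem emit_eq (k : Nat) : ∀ (n : Int) (acc : String),
    dec2facEmit n (pvRise 1 k) (k+1) acc = acc ++ pvU 1 k n := by
  induction k with
  | zero =>
      intro n acc
      rw [dec2facEmit.eq_def]
      simp only [if_neg (by omega : ¬ 1 < 1)]
      show acc = acc ++ ""
      rw [String.append_empty]
  | succ k ih =>
      intro n acc
      rw [dec2facEmit.eq_def]
      simp only [if_pos (by omega : 1 < k+1+1)]
      have hm' : (k+1+1) - 1 = k+1 := by omega
      have hfdiv : PySem.Int.floordiv (pvRise 1 (k+1)) ((k+1 : Nat) : Int) = pvRise 1 k := by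
        have hpos : (0:Int) < ((k+1 : Nat) : Int) := by positivity
        rw [PySem.Int.floordiv_eq_ediv_of_pos hpos]
        have : pvRise 1 (k+1) = pvRise 1 k * ((k+1 : Nat) : Int) := by
          have := pvRise_succ_right k 1
          simpa [Nat.add_comm 1 k] using this
        rw [this]
        exact Int.mul_ediv_cancel _ (by positivity)
      simp only [hm', hfdiv]
      rw [ih]
      rw [String.append_assoc]; rfl

-- B's first loop finds j with j! ≤ n < (j+1)! and returns ((j+1)!, j+2)
theorem find_spec (μ : Nat) : ∀ (n f : Int) (m : Nat) (hf : 1 ≤ f) (hm : 1 ≤ m),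
    (n + 1 - f).toNat * 2 + (if m ≤ 1 then 1 else 0) ≤ μ →
    f = pvRise 1 (m - 1) → f ≤ n →
    ∃ j : Nat, dec2facFind n f m hf hm = (pvRise 1 (j+1), j+2) ∧
      pvRise 1 j ≤ n ∧ n < pvRise 1 (j+1) := by
  induction μ with
  | zero =>
      intro n f m hf hm hμ hfm hle
      exfalso
      have : (0:Int) < n + 1 - f := by omega
      omega
  | succ μ ih =>
      intro n f m hf hm hμ hfm hle
      have hfm' : f * (m : Int) = pvRise 1 m := by
        have h1 : pvRise 1 ((m-1)+1) = pvRise 1 (m-1) * ((1 + (m-1) : Nat) : Int) :=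
          pvRise_succ_right (m-1) 1
        have h2 : (m-1)+1 = m := by omega
        have h3 : 1 + (m-1) = m := by omega
        rw [h2, h3] at h1
        rw [hfm, ← h1]
      rw [dec2facFind.eq_def]
      simp only [if_pos hle]
      by_cases hc : f * (m : Int) ≤ n
      · -- recurse
        have hnext : f = pvRise 1 (m - 1) := hfm
        have hmeas : (n + 1 - f * (m : Int)).toNat * 2 + (if m + 1 ≤ 1 then 1 else 0) ≤ μ := by
          match m, hm with
          | 1, _ =>
              simp only [Nat.cast_one, mul_one] at *
              have e1 : (1:Nat) ≤ 1 := le_refl 1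
              simp only [if_pos e1, if_neg (by omega : ¬ (1+1 ≤ 1))] at *
              omega
          | (k+2), _ =>
              have hm2 : (2:Int) ≤ ((k+2 : Nat) : Int) := by push_cast; omega
              have hstep : f + 1 ≤ f * ((k+2 : Nat) : Int) := by nlinarith
              have e1 : ¬ (k+2 ≤ 1) := by omega
              have e2 : ¬ (k+2+1 ≤ 1) := by omega
              simp only [if_neg e1, if_neg e2] at *
              omega
        have hrec := ih n (f * (m : Int)) (m+1) (pvOneLeMulNat f m hf hm) (by omega)
          hmeas (by simpa using hfm') hc
        -- fix the invariant argument shape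
        exact hrec
      · -- stop at the next unfolding
        rw [dec2facFind.eq_def]
        simp only [if_neg hc]
        refine ⟨m - 1, ?_, ?_, ?_⟩
        · have h2 : (m-1)+1 = m := by omega
          have h3 : (m-1)+2 = m+1 := by omega
          rw [h2, h3, hfm']
        · have h2 : pvRise 1 (m-1) = f := hfm.symm
          rw [h2]; exact hle
        · have h2 : (m-1)+1 = m := by omega
          rw [h2, ← hfm']
          omega

-- ===== VERDICT (by name: the statement is the Claim_ definition above) =====
theorem dec2fac_spec : Claim_equal_dec2fac := by
  intro n _
  unfold Spec_dec2fac
  by_cases hn : n ≤ 0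
  · have hA : dec2fac n = "" := by
      rw [dec2fac, dec2facGo.eq_def]
      simp only [if_neg (by omega : ¬ (0:Int) < n)]
    have hB : dec2fac_alt n = "" := by
      rw [dec2fac_alt]
      simp only [if_pos hn]
    rw [hA, hB]
  · have hn1 : (1:Int) ≤ n := by omega
    obtain ⟨j, hfind, hlo, hhi⟩ := find_spec ((n + 1 - 1).toNat * 2 + 1) n 1 1 (le_refl 1)
      (le_refl 1) (by simp) (by simp [pvRise]) hn1
    have hA : dec2fac n = pvU 1 (j+1) n := by
      rw [dec2fac, goA_eq j 1 n "" (le_refl 1) hlo hhi, String.append_empty]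
    have hB : dec2fac_alt n = pvU 1 (j+1) n := by
      rw [dec2fac_alt]
      simp only [if_neg hn]
      rw [hfind]
      show dec2facEmit n (pvRise 1 (j+1)) ((j+1)+1) "" = pvU 1 (j+1) n
      rw [emit_eq (j+1) n "", String.empty_append]
    rw [hA, hB]
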